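-- pv_equiv track=rewrite | github.com/bhzhangyuanlin/AlgorithmLearn | rot_bar.py | rot_recursion_2
-- ===== SOURCE A (Python) =====
-- def rot_recursion(p, n):  # 递归思路写切割钢条问题，左边不切，切右边
--     if n == 0:
--         return 0
--     else:
--         r = 0  # 总价
--         for i in range(1, n + 1):
--             r = max(r, p[i] + rot_recursion(p, n - i))
--         return r
--
-- def rot_recursion_2(p, n):  # 比较所有情况的递归，两边都切一遍
--     if n == 0:
--         return 0
--     else:
--         r = 0
--         for i in range(1, n):
--             r = max(r, rot_recursion(p, i) + rot_recursion(p, n - i))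
--         return r
-- ===== SOURCE B (Python) =====
-- def rot_recursion_2(p, n):
--     # Bottom-up DP: f[k] = best value for a rod of length k (left piece uncut rule
--     # folded in via max with 0), then best forced split = max over f[i] + f[n-i].
--     if n == 0 or n == 1 or n < 0:
--         return 0
--     f = [0] * n
--     for k in range(1, n):
--         f[k] = max([0] + [p[i] + f[k - i] for i in range(1, k + 1)])
--     return max([0] + [f[i] + f[n - i] for i in range(1, n)])
-- ===== Notes on version B (the rewrite author's own statement) =====
-- stated objective: alternative
-- what changed: Replaces the two-level recursion (rot_recursion re-invoked from scratch for every split and sub-length) with a bottom-up DP table f[k] of optimal rod values followed by one pass taking the max of f[i]+f[n-i] over all splits; intended as asymptotically faster (O(n^2) vs exponential) but a timing run could not confirm it because A timed out on most larger inputs.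
-- outside the precondition, e.g. on rot_recursion_2([0, 5], 3): A raises IndexError, B raises IndexError
import Mathlib
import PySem

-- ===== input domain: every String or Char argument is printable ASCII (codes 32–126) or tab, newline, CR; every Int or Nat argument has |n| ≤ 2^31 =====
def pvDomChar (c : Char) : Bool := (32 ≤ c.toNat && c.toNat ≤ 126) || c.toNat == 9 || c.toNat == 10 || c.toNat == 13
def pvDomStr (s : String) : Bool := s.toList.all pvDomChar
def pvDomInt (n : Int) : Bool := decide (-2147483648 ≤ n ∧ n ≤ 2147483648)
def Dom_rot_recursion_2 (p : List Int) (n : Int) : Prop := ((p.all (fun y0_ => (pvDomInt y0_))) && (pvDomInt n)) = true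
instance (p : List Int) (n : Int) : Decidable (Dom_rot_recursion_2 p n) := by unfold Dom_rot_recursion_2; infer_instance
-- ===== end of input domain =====

-- B computes the same value with a bottom-up DP table f[k] (best value of a rod
-- of length k) and one pass over the splits, instead of A's two-level recursion.


-- ===== PORT A =====
-- helper rot_recursion: one-sided recursive rod cutting (p[i] + rot_recursion(p, n-i)).
def rotA (p : List Int) (n : Int) : Int :=
  if n = 0 then 0
  else
    (PySem.List.pyRange 1 (n + 1) 1).attach.foldl
      (fun r i => max r (PySem.List.pyGetD p i.1 0 + rotA p (n - i.1))) 0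
termination_by n.toNat
decreasing_by
  have h := (PySem.List.mem_pyRange_one.mp i.2)
  omega

def rot_recursion_2 (p : List Int) (n : Int) : Int :=
  if n = 0 then 0
  else
    (PySem.List.pyRange 1 n 1).foldl
      (fun r i => max r (rotA p i + rotA p (n - i))) 0

-- ===== PORT B =====
-- one step of the DP loop body: f[k] = max([0] + [p[i] + f[k-i] for i in range(1, k+1)])
def fstep (p : List Int) (f : List Int) (k : Int) : List Int :=
  f.set k.toNat
    ((PySem.List.max?
        ((0 : Int) ::
          (PySem.List.pyRange 1 (k + 1) 1).map
            (fun i => PySem.List.pyGetD p i 0 + PySem.List.pyGetD f (k - i) 0))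
        (fun x => x)).getD 0)

def rot_recursion_2_alt (p : List Int) (n : Int) : Int :=
  if n = 0 ∨ n = 1 ∨ n < 0 then 0
  else
    let f := (PySem.List.pyRange 1 n 1).foldl (fstep p) (List.replicate n.toNat 0)
    (PySem.List.max?
        ((0 : Int) ::
          (PySem.List.pyRange 1 n 1).map
            (fun i => PySem.List.pyGetD f i 0 + PySem.List.pyGetD f (n - i) 0))
        (fun x => x)).getD 0

-- ===== PRECONDITION & SPEC =====
-- Pre_ excludes exactly the inputs where A raises IndexError: for n ≥ 2 the
-- recursion accesses p[1..n-1], so len(p) ≥ n is required.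
def Pre_rot_recursion_2 (p : List Int) (n : Int) : Prop := n ≤ 1 ∨ n ≤ (p.length : Int)
instance (p : List Int) (n : Int) : Decidable (Pre_rot_recursion_2 p n) := by unfold Pre_rot_recursion_2; infer_instance

def pvWitness_rot_recursion_2 : List Int × Int := ([0, 1, 5, 8, 9], 4)

def Spec_rot_recursion_2 (p : List Int) (n : Int) (out : Int) : Prop := out = rot_recursion_2_alt p n
instance (p : List Int) (n : Int) (out : Int) : Decidable (Spec_rot_recursion_2 p n out) := by unfold Spec_rot_recursion_2; infer_instance

-- ===== CLAIM (what is proved, stated in full; the proofs are below) =====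
def Claim_equal_rot_recursion_2 : Prop := ∀ (p : List Int) (n : Int), Dom_rot_recursion_2 p n → Pre_rot_recursion_2 p n → Spec_rot_recursion_2 p n (rot_recursion_2 p n)

-- ===== LEMMAS AND PROOFS =====

-- unfolding of rotA without the attach wrapper
theorem rotA_unfold (p : List Int) {n : Int} (hn : n ≠ 0) :
    rotA p n = (PySem.List.pyRange 1 (n + 1) 1).foldl
      (fun r i => max r (PySem.List.pyGetD p i 0 + rotA p (n - i))) 0 := by
  rw [rotA, if_neg hn]
  exact List.foldl_attach (f := fun r x => max r (PySem.List.pyGetD p x 0 + rotA p (n - x)))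

theorem rotA_zero (p : List Int) : rotA p 0 = 0 := by
  rw [rotA]; simp

-- the DP table after the first m iterations of B's loop
def Ftab (p : List Int) (N m : Nat) : List Int :=
  (PySem.List.pyRange 1 (m : Int) 1).foldl (fstep p) (List.replicate N 0)

theorem foldl_fstep_length (p : List Int) (l : List Int) (f0 : List Int) :
    (l.foldl (fstep p) f0).length = f0.length := by
  induction l generalizing f0 with
  | nil => rfl
  | cons a t ih => simp [List.foldl_cons, ih, fstep, List.length_set]

theorem Ftab_length (p : List Int) (N m : Nat) : (Ftab p N m).length = N := by
  simp [Ftab, foldl_fstep_length]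

theorem Ftab_get (p : List Int) (N : Nat) :
    ∀ m : Nat, m ≤ N → ∀ j : Nat, j < N →
      PySem.List.pyGetD (Ftab p N m) (j : Int) 0 =
        if j < m then rotA p (j : Int) else 0 := by
  intro m
  induction m with
  | zero =>
    intro _ j hj
    simp [Ftab, PySem.List.pyRange_one_eq_nil, PySem.List.pyGetD_natCast,
      List.getD_eq_getElem?_getD, hj]
  | succ m ih =>
    intro hm j hj
    by_cases hm0 : m = 0
    · subst hm0
      have : PySem.List.pyRange 1 ((1 : Nat) : Int) 1 = [] :=
        PySem.List.pyRange_one_eq_nil (by norm_num)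
      simp only [Ftab, this, List.foldl_nil]
      rcases Nat.eq_zero_or_pos j with hj0 | hj0
      · subst hj0
        simp [PySem.List.pyGetD_ofNat', List.getD_eq_getElem?_getD, hj, rotA_zero]
      · have : ¬ (j < 1) := by omega
        simp [PySem.List.pyGetD_natCast, List.getD_eq_getElem?_getD, hj, this]
    · have hm1 : 1 ≤ (m : Int) := by exact_mod_cast Nat.one_le_iff_ne_zero.mpr hm0
      have hsplit : Ftab p N (m + 1) = fstep p (Ftab p N m) (m : Int) := by
        have : ((m + 1 : Nat) : Int) = (m : Int) + 1 := by push_cast; ring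
        rw [Ftab, this, PySem.List.pyRange_one_succ_right hm1, List.foldl_append]
        rfl
      -- the freshly computed value is rotA p m
      have hmlt : m < N := by omega
      have hval :
          ((PySem.List.max?
              ((0 : Int) ::
                (PySem.List.pyRange 1 ((m : Int) + 1) 1).map
                  (fun i => PySem.List.pyGetD p i 0 +
                    PySem.List.pyGetD (Ftab p N m) ((m : Int) - i) 0))
              (fun x => x)).getD 0) = rotA p (m : Int) := by
        have hmap :
            (PySem.List.pyRange 1 ((m : Int) + 1) 1).map
                (fun i => PySem.List.pyGetD p i 0 +
                  PySem.List.pyGetD (Ftab p N m) ((m : Int) - i) 0) =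
            (PySem.List.pyRange 1 ((m : Int) + 1) 1).map
                (fun i => PySem.List.pyGetD p i 0 + rotA p ((m : Int) - i)) := by
          apply List.map_congr_left
          intro i hi
          have hib := PySem.List.mem_pyRange_one.mp hi
          have hcast : ((m : Int) - i) = ((m - i.toNat : Nat) : Int) := by omega
          have hjm : m - i.toNat < m := by omega
          rw [hcast, ih (by omega) _ (by omega), if_pos hjm]
        rw [hmap, PySem.List.max?_id_cons, Option.getD_some, List.foldl_map,
          rotA_unfold p (n := (m : Int)) (by omega)]
      rw [hsplit]
      simp only [fstep, hval]
      have htn : ((m : Int)).toNat = m := Int.toNat_natCast m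
      rw [htn, PySem.List.pyGetD_natCast, List.getD_eq_getElem?_getD,
        List.getElem?_set]
      by_cases hjm : m = j
      · subst hjm
        rw [if_pos rfl, if_pos (by rw [Ftab_length]; exact hmlt)]
        simp
      · rw [if_neg hjm]
        have := ih (by omega) j hj
        rw [PySem.List.pyGetD_natCast, List.getD_eq_getElem?_getD] at this
        rw [this]
        by_cases hlt : j < m
        · rw [if_pos hlt, if_pos (by omega)]
        · rw [if_neg hlt, if_neg (by omega)]

theorem rot_recursion_2_spec : Claim_equal_rot_recursion_2 := by
  intro p n _ _
  unfold Spec_rot_recursion_2 rot_recursion_2 rot_recursion_2_alt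
  by_cases h0 : n = 0
  · simp [h0]
  · rw [if_neg h0]
    by_cases h1 : n ≤ 1
    · have hr : PySem.List.pyRange 1 n 1 = [] := PySem.List.pyRange_one_eq_nil h1
      have : n = 1 ∨ n < 0 := by omega
      rw [if_pos (by tauto), hr, List.foldl_nil]
    · rw [if_neg (by omega)]
      have hn2 : 2 ≤ n := by omega
      have hcast : ((n.toNat : Nat) : Int) = n := Int.toNat_of_nonneg (by omega)
      have hmap :
          (PySem.List.pyRange 1 n 1).map
              (fun i =>
                PySem.List.pyGetD
                  ((PySem.List.pyRange 1 n 1).foldl (fstep p) (List.replicate n.toNat 0)) i 0 +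
                PySem.List.pyGetD
                  ((PySem.List.pyRange 1 n 1).foldl (fstep p) (List.replicate n.toNat 0)) (n - i) 0) =
          (PySem.List.pyRange 1 n 1).map (fun i => rotA p i + rotA p (n - i)) := by
        have hF : (PySem.List.pyRange 1 n 1).foldl (fstep p) (List.replicate n.toNat 0) =
            Ftab p n.toNat n.toNat := by
          rw [Ftab, hcast]
        rw [hF]
        apply List.map_congr_left
        intro i hi
        have hib := PySem.List.mem_pyRange_one.mp hi
        have h1 : (i : Int) = ((i.toNat : Nat) : Int) := by omega
        have h2 : (n - i) = (((n - i).toNat : Nat) : Int) := by omega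
        have e1 : PySem.List.pyGetD (Ftab p n.toNat n.toNat) i 0 = rotA p i := by
          rw [h1, Ftab_get p n.toNat n.toNat le_rfl i.toNat (by omega),
            if_pos (by omega)]
        have e2 : PySem.List.pyGetD (Ftab p n.toNat n.toNat) (n - i) 0 = rotA p (n - i) := by
          rw [h2, Ftab_get p n.toNat n.toNat le_rfl (n - i).toNat (by omega),
            if_pos (by omega)]
        rw [e1, e2]
      show (PySem.List.pyRange 1 n 1).foldl (fun r i => max r (rotA p i + rotA p (n - i))) 0 =
        (PySem.List.max?
            ((0 : Int) ::
              (PySem.List.pyRange 1 n 1).map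
                (fun i =>
                  PySem.List.pyGetD
                    ((PySem.List.pyRange 1 n 1).foldl (fstep p) (List.replicate n.toNat 0)) i 0 +
                  PySem.List.pyGetD
                    ((PySem.List.pyRange 1 n 1).foldl (fstep p) (List.replicate n.toNat 0)) (n - i) 0))
            (fun x => x)).getD 0
      rw [hmap, PySem.List.max?_id_cons, Option.getD_some, List.foldl_map]
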